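-- pv_equiv track=rewrite | github.com/hauensteina/katagui | katago_gui/helpers.py | moves2arr
-- ===== SOURCE A (Python) =====
-- def moves2arr(moves):
--     """ Q16D4 -> ['Q16','D4'] """
--     movearr = []
--     m = ''
--     for c in moves:
--         if c > '9':  # a letter
--             if m:
--                 movearr.append(m)
--             m = c
--         else:
--             m += c
--     if m:
--         movearr.append(m)
--     return movearr
-- ===== SOURCE B (Python) =====
-- def moves2arr(moves):
--     """ Q16D4 -> ['Q16','D4'] """
--     res = []
--     n = len(moves)
--     i = 0
--     while i < n:
--         j = i + 1
--         while j < n and moves[j] <= '9':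
--             j += 1
--         res.append(moves[i:j])
--         i = j
--     return res
-- ===== Notes on version B (the rewrite author's own statement) =====
-- stated objective: alternative
-- what changed: Replaces the char-by-char accumulator-and-flush loop with a greedy token splitter that repeatedly slices off one token (head char plus the following digit run) from the front of the string.
import Mathlib
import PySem

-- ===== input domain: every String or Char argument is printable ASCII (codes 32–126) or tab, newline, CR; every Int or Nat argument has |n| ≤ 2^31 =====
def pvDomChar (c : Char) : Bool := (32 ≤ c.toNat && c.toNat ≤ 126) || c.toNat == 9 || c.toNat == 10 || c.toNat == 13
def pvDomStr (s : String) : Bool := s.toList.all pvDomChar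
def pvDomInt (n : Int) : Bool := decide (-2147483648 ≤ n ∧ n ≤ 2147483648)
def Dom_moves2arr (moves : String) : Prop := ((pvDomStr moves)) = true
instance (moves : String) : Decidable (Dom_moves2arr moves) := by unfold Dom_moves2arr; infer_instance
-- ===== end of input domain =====

-- B replaces A's accumulator-and-flush character loop by a greedy front splitter
-- (token = head char plus following digit run); objective: alternative decomposition.

-- ===== PORT A =====
-- A's loop body: state `(movearr, m)` with the pending token m kept as a List Char.
def movesStepA (st : List String × List Char) (c : Char) : List String × List Char :=
  if c > '9' then
    ((if st.2 ≠ [] then st.1 ++ [String.ofList st.2] else st.1), [c])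
  else
    (st.1, st.2 ++ [c])

def moves2arr (moves : String) : List String :=
  let st := moves.toList.foldl movesStepA ([], [])
  if st.2 ≠ [] then st.1 ++ [String.ofList st.2] else st.1

-- ===== PORT B =====
-- Source B's outer while-loop: slice off `rest[:k]` (head char + digit run) and recurse on `rest[k:]`.
def movesSplitB : List Char → List (List Char)
  | [] => []
  | c :: rest =>
      (c :: rest.takeWhile (fun d => d ≤ '9')) :: movesSplitB (rest.dropWhile (fun d => d ≤ '9'))
termination_by l => l.length
decreasing_by
  exact Nat.lt_succ_of_le (List.length_dropWhile_le _ _)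

def moves2arr_alt (moves : String) : List String :=
  (movesSplitB moves.toList).map String.ofList

-- ===== PRECONDITION & SPEC =====
def Spec_moves2arr (moves : String) (out : List String) : Prop := out = moves2arr_alt moves
instance (moves : String) (out : List String) : Decidable (Spec_moves2arr moves out) := by unfold Spec_moves2arr; infer_instance

-- ===== CLAIM (what is proved, stated in full; the proofs are below) =====
def Claim_equal_moves2arr : Prop := ∀ (moves : String), Dom_moves2arr moves → Spec_moves2arr moves (moves2arr moves)

-- ===== LEMMAS AND PROOFS =====

-- A's finishing step.
def movesFinishA (st : List String × List Char) : List String :=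
  if st.2 ≠ [] then st.1 ++ [String.ofList st.2] else st.1

theorem movesSplitB_cons (c : Char) (t : List Char) :
    movesSplitB (c :: t) =
      (c :: t.takeWhile (fun d => d ≤ '9')) :: movesSplitB (t.dropWhile (fun d => d ≤ '9')) := by
  rw [movesSplitB.eq_def]

-- Main loop invariant: with a nonempty pending token m, A's remaining run produces
-- the pending token extended by the digit run, then B's split of the remainder.
theorem movesLoopA_eq (l : List Char) : ∀ (acc : List String) (m : List Char), m ≠ [] →
    movesFinishA (l.foldl movesStepA (acc, m)) =
      acc ++ ((m ++ l.takeWhile (fun d => d ≤ '9')) ::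
        movesSplitB (l.dropWhile (fun d => d ≤ '9'))).map String.ofList := by
  induction l with
  | nil =>
      intro acc m hm
      simp [movesFinishA, movesSplitB, hm]
  | cons c t ih =>
      intro acc m hm
      by_cases hc : c > '9'
      · have hle : ¬ (c ≤ '9') := not_le.mpr hc
        rw [List.foldl_cons]
        have hstep : movesStepA (acc, m) c = (acc ++ [String.ofList m], [c]) := by
          simp [movesStepA, hc, hm]
        rw [hstep, ih (acc ++ [String.ofList m]) [c] (by simp)]
        simp [hle, movesSplitB_cons]
      · have hle : c ≤ '9' := not_lt.mp hc
        rw [List.foldl_cons]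
        have hstep : movesStepA (acc, m) c = (acc, m ++ [c]) := by
          simp [movesStepA, hc]
        rw [hstep, ih acc (m ++ [c]) (by simp)]
        simp [hle]

theorem moves2arr_eq_alt (moves : String) : moves2arr moves = moves2arr_alt moves := by
  unfold moves2arr moves2arr_alt
  cases hl : moves.toList with
  | nil => simp [movesSplitB]
  | cons c t =>
      have hstep : movesStepA ([], []) c = ([], [c]) := by
        by_cases hc : c > '9' <;> simp [movesStepA, hc]
      show movesFinishA ((c :: t).foldl movesStepA ([], [])) = _
      rw [List.foldl_cons, hstep, movesLoopA_eq t [] [c] (by simp), movesSplitB_cons]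
      simp

-- ===== VERDICT (by name: the statement is the Claim_ definition above) =====
theorem moves2arr_spec : Claim_equal_moves2arr := by
  intro moves _
  exact moves2arr_eq_alt moves
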